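-- pv_equiv track=rewrite | github.com/aarontang0904/Math-16b | hw3.py | reverse_dictionary
-- ===== SOURCE A (Python) =====
-- def reverse_dictionary(d):
--   '''
--   Parameters
--   ----------
--   - d: dictionary whose values are immutable
--
--   Returns
--   -------
--   reversed dictionary, whose keys are the values of d,
--   and whose values are lists of keys of d.
--
--   For example:
--   reverse_dictionary({1 : a, 2: b, 3: b})
--     ={a : 1, b: [2,3]}
--   '''
--   output = {}
--   for key, value in d.items():
--     if value in output:
--       output[value].append(key)
--     else:
--       output[value] = [key]
--   return output
-- ===== SOURCE B (Python) =====
-- def reverse_dictionary(d):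
--   '''Alternative: first collect the distinct values in first-appearance order,
--   then build each group by scanning all items for keys with that value.'''
--   order = dict.fromkeys(d.values())
--   return {v: [k for k, w in d.items() if w == v] for v in order}
-- ===== Notes on version B (the rewrite author's own statement) =====
-- stated objective: alternative
-- what changed: A builds the groups in a single pass mutating a dict entry per item; B first computes the distinct values in first-appearance order (dict.fromkeys) and then, per distinct value, scans all items to collect the matching keys.
import Mathlib
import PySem

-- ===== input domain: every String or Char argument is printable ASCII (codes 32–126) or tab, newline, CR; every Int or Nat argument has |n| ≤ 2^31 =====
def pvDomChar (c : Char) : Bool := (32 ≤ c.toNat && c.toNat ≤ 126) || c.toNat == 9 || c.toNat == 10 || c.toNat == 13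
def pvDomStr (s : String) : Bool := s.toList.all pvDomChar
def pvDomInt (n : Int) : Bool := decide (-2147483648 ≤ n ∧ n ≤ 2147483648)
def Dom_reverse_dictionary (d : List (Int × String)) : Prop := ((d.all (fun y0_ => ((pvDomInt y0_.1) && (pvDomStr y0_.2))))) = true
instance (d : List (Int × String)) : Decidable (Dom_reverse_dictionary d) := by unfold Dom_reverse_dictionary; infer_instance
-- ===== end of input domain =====

-- B rebuilds the same grouping by an outer loop over the distinct values with an inner
-- full scan per value (alternative decomposition; not faster).
-- ===== PORT A =====
def reverse_dictionary (d : List (Int × String)) : List (String × List Int) :=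
  (d.foldl
    (fun (out : PySem.Dict String (List Int)) kv =>
      if out.contains kv.2 then out.modify kv.2 [] (fun l => l ++ [kv.1])
      else out.insert kv.2 [kv.1])
    PySem.Dict.empty).items

-- ===== PORT B =====
def reverse_dictionary_alt (d : List (Int × String)) : List (String × List Int) :=
  (PySem.List.dedup (d.map (fun p => p.2))).map
    (fun v => (v, (d.filter (fun p => p.2 == v)).map (fun p => p.1)))

-- ===== PRECONDITION & SPEC =====
def Spec_reverse_dictionary (d : List (Int × String)) (out : List (String × List Int)) : Prop := out = reverse_dictionary_alt d
instance (d : List (Int × String)) (out : List (String × List Int)) : Decidable (Spec_reverse_dictionary d out) := by unfold Spec_reverse_dictionary; infer_instance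

-- ===== CLAIM (what is proved, stated in full; the proofs are below) =====
def Claim_equal_reverse_dictionary : Prop := ∀ (d : List (Int × String)), Dom_reverse_dictionary d → Spec_reverse_dictionary d (reverse_dictionary d)

-- ===== LEMMAS AND PROOFS =====

-- ===== VERDICT (by name: the statement is the Claim_ definition above) =====
-- A's loop body equals a single 'modify' (append to the group, creating it if absent).
lemma pv_step_eq (out : PySem.Dict String (List Int)) (kv : Int × String) :
    (if out.contains kv.2 then out.modify kv.2 [] (fun l => l ++ [kv.1])
     else out.insert kv.2 [kv.1]) = out.modify kv.2 [] (fun l => l ++ [kv.1]) := by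
  by_cases h : out.contains kv.2
  · simp [h]
  · simp [h, PySem.Dict.modify, PySem.Dict.getD_of_not_contains]

-- The group of value c after A's loop: previous group plus the matching keys, in order.
lemma pv_getD (l : List (Int × String)) (dd : PySem.Dict String (List Int)) (c : String) :
    (l.foldl (fun dd p => dd.modify p.2 [] (fun g => g ++ [p.1])) dd).getD c []
      = dd.getD c [] ++ (l.filter (fun p => p.2 == c)).map (fun p => p.1) := by
  induction l generalizing dd with
  | nil => simp
  | cons p t ih =>
    rw [List.foldl_cons, ih, List.filter_cons]
    by_cases h : p.2 = c
    · subst h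
      simp [PySem.Dict.getD_modify_self]
    · simp [PySem.Dict.getD_modify_of_ne, Ne.symm h, h]

-- The keys after A's loop: the distinct values in first-appearance order.
lemma pv_keys (d : List (Int × String)) :
    (d.foldl (fun out (kv : Int × String) => out.modify kv.2 [] (fun l => l ++ [kv.1]))
        PySem.Dict.empty).keys
      = PySem.List.dedup (d.map (fun p => p.2)) := by
  rw [PySem.Dict.keys_foldl_modify_key]
  simp only [PySem.Dict.keys_empty, PySem.Set.update_nil_left, PySem.List.dedup_eq_ofList]

lemma pv_nodup_keys (d : List (Int × String)) :
    (d.foldl (fun out (kv : Int × String) => out.modify kv.2 [] (fun l => l ++ [kv.1]))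
        PySem.Dict.empty).keys.Nodup := by
  exact PySem.Dict.nodup_keys_foldl_modify_key d (fun p => p.2) []
    (fun _ p => (fun l => l ++ [p.1])) PySem.Dict.empty PySem.Dict.nodup_keys_empty

lemma pv_main (d : List (Int × String)) :
    reverse_dictionary d = reverse_dictionary_alt d := by
  unfold reverse_dictionary reverse_dictionary_alt
  simp only [pv_step_eq]
  rw [PySem.Dict.items_eq_map_keys _ (pv_nodup_keys d) [], pv_keys d]
  refine List.map_congr_left (fun v hv => ?_)
  rw [pv_getD d PySem.Dict.empty v]
  simp

theorem reverse_dictionary_spec : Claim_equal_reverse_dictionary := by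
  intro d _
  unfold Spec_reverse_dictionary
  exact pv_main d
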